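-- pv_equiv track=rewrite | github.com/frkl/trojai-fuzzing-vision | util/perm_inv_v1b.py | breakable_n
-- ===== SOURCE A (Python) =====
-- import itertools
--
-- def powerset(n):
--     s = list(range(n))
--     return itertools.chain.from_iterable(itertools.combinations(s, r) for r in range(len(s)+1))
--
-- def breakable_n(comp):
--     #generate all splits
--     n=len(comp[0])
--     k=len(comp)
--     partitions=list(powerset(n))[1:-1]
--
--     #check whether the split was perfect
--     for ind in partitions:
--         ind2=set(list(range(n))).difference(set(list(ind)))
--         ind2=list(ind2)
--
--         affix_0=[[x[i] for i in ind] for x in comp]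
--         affix_1=[[x[i] for i in ind2] for x in comp]
--
--         no_shared=[len(set(affix_0[i]).intersection(set(affix_1[i])))==0 for i in range(len(comp))]
--
--         if all(no_shared):
--             return True
--
--     return False
-- ===== SOURCE B (Python) =====
-- def breakable_n(comp):
--     # Breakable iff the columns split into two nonempty groups with no row
--     # sharing a value across the split.  Equivalently: the "share a value in
--     # some row" graph on columns 0..n-1 is disconnected.  Instead of trying
--     # all 2^n splits, propagate reachability from column 0 to a fixpoint
--     # (n passes suffice) and test whether it covers all columns.
--     n = len(comp[0])
--     reach = [i == 0 for i in range(n)]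
--     for _ in range(n):
--         for row in comp:
--             vals = set()
--             for i in range(n):
--                 if reach[i]:
--                     vals.add(row[i])
--             for j in range(n):
--                 if row[j] in vals:
--                     reach[j] = True
--     return n >= 2 and not all(reach)
-- ===== Notes on version B (the rewrite author's own statement) =====
-- stated objective: faster
-- what changed: A enumerates all 2^n column subsets and tests each split for shared values; B instead propagates connectivity between columns that share a value in some row (fixpoint reachability from column 0) and reports breakable iff some column stays unreachable, replacing the exponential subset search by a polynomial closure computation.
-- outside the precondition, e.g. on breakable_n([[5], [5], []]): A returns False, B raises IndexError
import Mathlib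
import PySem

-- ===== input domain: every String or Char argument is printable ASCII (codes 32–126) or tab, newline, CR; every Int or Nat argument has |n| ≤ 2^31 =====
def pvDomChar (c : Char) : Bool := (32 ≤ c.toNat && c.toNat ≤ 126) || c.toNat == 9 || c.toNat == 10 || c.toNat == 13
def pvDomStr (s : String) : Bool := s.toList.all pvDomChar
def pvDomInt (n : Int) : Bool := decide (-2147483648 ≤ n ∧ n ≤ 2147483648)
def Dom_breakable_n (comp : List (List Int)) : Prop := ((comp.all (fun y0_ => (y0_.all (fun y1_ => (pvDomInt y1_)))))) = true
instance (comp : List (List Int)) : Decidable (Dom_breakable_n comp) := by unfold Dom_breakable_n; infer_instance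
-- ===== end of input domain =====

-- B replaces A's exponential enumeration of all column splits by a polynomial
-- reachability fixpoint over columns that share a value in some row (faster, asymptotic).

-- ===== PORT A =====
-- itertools.combinations(s, r) in itertools' lexicographic order
def pvCombos : List Int → Nat → List (List Int)
  | _, 0 => [[]]
  | [], _ + 1 => []
  | x :: xs, r + 1 => (pvCombos xs r).map (fun c => x :: c) ++ pvCombos xs (r + 1)

-- powerset(n): chain of combinations(range(n), r) for r = 0 .. n
def pvPowerset (n : Nat) : List (List Int) :=
  (List.range (n + 1)).flatMap (fun r => pvCombos (PySem.List.pyRange 0 (n : Int) 1) r)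

-- ind2 = set(range(n)).difference(set(ind)), ascending (only its set contents reach the result)
def pvInd2 (n : Nat) (ind : List Int) : List Int :=
  PySem.Set.diff (PySem.Set.ofList (PySem.List.pyRange 0 (n : Int) 1)) (PySem.Set.ofList ind)

-- the body of A's loop: affixes + 'all(no_shared)'
def pvNoSharedAll (comp : List (List Int)) (n : Nat) (ind : List Int) : Bool :=
  let ind2 := pvInd2 n ind
  let affix0 := comp.map (fun x => ind.map (fun i => PySem.List.pyGetD x i 0))
  let affix1 := comp.map (fun x => ind2.map (fun i => PySem.List.pyGetD x i 0))
  (List.range comp.length).all (fun i =>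
    PySem.Set.len (PySem.Set.inter (PySem.Set.ofList (affix0.getD i []))
      (PySem.Set.ofList (affix1.getD i []))) == 0)

def breakable_n (comp : List (List Int)) : Bool :=
  let n := (comp.headD []).length
  let partitions := ((pvPowerset n).drop 1).dropLast
  partitions.any (fun ind => pvNoSharedAll comp n ind)

-- ===== PORT B =====
-- one row of Source B's propagation pass: vals = values at reached columns, then mark columns sharing one
def pvRowPass (n : Nat) (row : List Int) (reach : List Bool) : List Bool :=
  let vals := (List.range n).foldl
    (fun s i => if reach.getD i false then PySem.Set.add s (PySem.List.pyGetD row (i : Int) 0) else s)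
    PySem.Set.empty
  (List.range n).map (fun j => reach.getD j false || PySem.Set.contains vals (PySem.List.pyGetD row (j : Int) 0))

def breakable_n_alt (comp : List (List Int)) : Bool :=
  let n := (comp.headD []).length
  let reach0 := (List.range n).map (fun i => decide (i = 0))
  let reach := (List.range n).foldl (fun r _ => comp.foldl (fun r row => pvRowPass n row r) r) reach0
  decide (2 ≤ n) && ! reach.all (fun b => b)

-- ===== PRECONDITION & SPEC =====
-- Pre_ excludes the inputs on which the Python A raises IndexError (empty comp, and rows
-- shorter than the first row when there are at least 2 columns) and, with them, the ragged
-- inputs with at most 1 column, where A happens to return False without ever indexing the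
-- short rows while B's natural propagation reads every row and raises IndexError.
def Pre_breakable_n (comp : List (List Int)) : Prop :=
  comp ≠ [] ∧ ∀ row ∈ comp, (comp.headD []).length ≤ row.length
instance (comp : List (List Int)) : Decidable (Pre_breakable_n comp) := by
  unfold Pre_breakable_n; infer_instance

def pvWitness_breakable_n : List (List Int) := [[1, 2], [3, 3]]

def Spec_breakable_n (comp : List (List Int)) (out : Bool) : Prop := out = breakable_n_alt comp
instance (comp : List (List Int)) (out : Bool) : Decidable (Spec_breakable_n comp out) := by
  unfold Spec_breakable_n; infer_instance

-- ===== CLAIM (what is proved, stated in full; the proofs are below) =====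
def Claim_equal_breakable_n : Prop :=
  ∀ (comp : List (List Int)), Dom_breakable_n comp → Pre_breakable_n comp →
    Spec_breakable_n comp (breakable_n comp)

-- ===== LEMMAS AND PROOFS =====

-- value of row at (Nat) column i, exactly as both ports read it
def pvVal (row : List Int) (i : Nat) : Int := PySem.List.pyGetD row (i : Int) 0

-- columns i and j share a value in some row
def pvEdge (comp : List (List Int)) (i j : Nat) : Prop :=
  ∃ row ∈ comp, pvVal row i = pvVal row j

def pvStepR (comp : List (List Int)) (n : Nat) (i j : Nat) : Prop :=
  i < n ∧ j < n ∧ pvEdge comp i j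

def pvReach (comp : List (List Int)) (n : Nat) (j : Nat) : Prop :=
  Relation.ReflTransGen (pvStepR comp n) 0 j

def pvPass (comp : List (List Int)) (n : Nat) (r : List Bool) : List Bool :=
  comp.foldl (fun r row => pvRowPass n row r) r

def pvIterN (comp : List (List Int)) (n : Nat) : Nat → List Bool
  | 0 => (List.range n).map (fun i => decide (i = 0))
  | k + 1 => pvPass comp n (pvIterN comp n k)

-- a valid split of the columns, as a predicate
def pvSplit (comp : List (List Int)) (n : Nat) (p : Nat → Bool) : Prop :=
  (∃ i, i < n ∧ p i = true) ∧ (∃ j, j < n ∧ p j = false) ∧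
  ∀ i j, i < n → j < n → p i = true → p j = false → ¬ pvEdge comp i j

-- ---- A-side lemmas ----

theorem pvCombos_mem (s : List Int) (r : Nat) (l : List Int) :
    l ∈ pvCombos s r ↔ l.Sublist s ∧ l.length = r := by
  induction s generalizing r l with
  | nil =>
    cases r with
    | zero => simp [pvCombos, List.sublist_nil]
    | succ r =>
      simp only [pvCombos, List.not_mem_nil, false_iff]
      rintro ⟨hs, hlen⟩
      simp [List.sublist_nil] at hs
      simp [hs] at hlen
  | cons x xs ih =>
    cases r with
    | zero =>
      simp only [pvCombos, List.mem_singleton]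
      constructor
      · rintro rfl; simp
      · rintro ⟨_, hlen⟩; exact List.length_eq_zero_iff.mp hlen
    | succ r =>
      simp only [pvCombos, List.mem_append, List.mem_map]
      constructor
      · rintro (⟨c, hc, rfl⟩ | h)
        · obtain ⟨hs, hlen⟩ := ih r c |>.mp hc
          exact ⟨List.Sublist.cons₂ x hs, by simp [hlen]⟩
        · obtain ⟨hs, hlen⟩ := ih (r+1) l |>.mp h
          exact ⟨hs.cons x, hlen⟩
      · rintro ⟨hs, hlen⟩
        cases hs with
        | cons _ h => exact Or.inr ((ih (r+1) l).mpr ⟨h, hlen⟩)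
        | cons₂ _ h =>
          exact Or.inl ⟨_, (ih r _).mpr ⟨h, by simpa using hlen⟩, rfl⟩

theorem pvCombos_gt (s : List Int) (r : Nat) (h : s.length < r) : pvCombos s r = [] := by
  rw [List.eq_nil_iff_forall_not_mem]
  intro l hl
  obtain ⟨hs, hlen⟩ := (pvCombos_mem s r l).mp hl
  have := hs.length_le
  omega

theorem pvCombos_full (s : List Int) : pvCombos s s.length = [s] := by
  induction s with
  | nil => rfl
  | cons x xs ih =>
    show (pvCombos xs xs.length).map (fun c => x :: c) ++ pvCombos xs (xs.length + 1) = [x :: xs]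
    rw [ih, pvCombos_gt xs (xs.length + 1) (by omega)]
    simp

theorem pvPartitions_eq (n : Nat) :
    ((pvPowerset n).drop 1).dropLast
      = (List.range' 1 (n - 1)).flatMap (fun r => pvCombos (PySem.List.pyRange 0 (n : Int) 1) r) := by
  cases n with
  | zero => decide
  | succ n =>
    have hs : (PySem.List.pyRange 0 ((n+1 : Nat) : Int) 1).length = n + 1 := by
      simp [PySem.List.length_pyRange_one]
    unfold pvPowerset
    rw [List.range_succ, List.range_succ_eq_map]
    simp only [List.flatMap_append, List.flatMap_map, List.flatMap_cons]
    have hfull : pvCombos (PySem.List.pyRange 0 ((n+1 : Nat) : Int) 1) (n + 1)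
        = [PySem.List.pyRange 0 ((n+1 : Nat) : Int) 1] := by
      have h2 := pvCombos_full (PySem.List.pyRange 0 ((n+1 : Nat) : Int) 1)
      rwa [hs] at h2
    rw [hfull]
    have h0 : ∀ s : List Int, pvCombos s 0 = [[]] := fun s => by cases s <;> rfl
    rw [h0]
    simp only [List.flatMap_nil, List.append_nil, List.singleton_append, Nat.add_sub_cancel]
    rw [List.range'_eq_map_range]
    simp [List.flatMap_map, Nat.add_comm]

theorem pvMem_partitions (n : Nat) (l : List Int) :
    l ∈ ((pvPowerset n).drop 1).dropLast
      ↔ l.Sublist (PySem.List.pyRange 0 (n : Int) 1) ∧ 1 ≤ l.length ∧ l.length ≤ n - 1 := by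
  rw [pvPartitions_eq]
  simp only [List.mem_flatMap, List.mem_range', pvCombos_mem]
  constructor
  · rintro ⟨r, ⟨i, hi, rfl⟩, hs, hlen⟩
    exact ⟨hs, by omega, by omega⟩
  · rintro ⟨hs, h1, h2⟩
    exact ⟨l.length, ⟨l.length - 1, by omega, by omega⟩, hs, rfl⟩

theorem pvMem_ind2 (n : Nat) (ind : List Int) (b : Int) :
    b ∈ pvInd2 n ind ↔ (0 ≤ b ∧ b < (n : Int)) ∧ b ∉ ind := by
  unfold pvInd2 PySem.Set.diff
  simp [List.mem_filter, PySem.Set.mem_ofList, PySem.List.mem_pyRange_one]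

theorem pvNoSharedAll_iff (comp : List (List Int)) (n : Nat) (ind : List Int) :
    pvNoSharedAll comp n ind = true
      ↔ ∀ row ∈ comp, ∀ a ∈ ind, ∀ b ∈ pvInd2 n ind,
          PySem.List.pyGetD row a 0 ≠ PySem.List.pyGetD row b 0 := by
  unfold pvNoSharedAll PySem.Set.len PySem.Set.inter
  simp only [List.all_eq_true, List.mem_range, beq_iff_eq, Int.natCast_eq_zero,
    List.length_eq_zero_iff, List.filter_eq_nil_iff]
  constructor
  · intro h row hrow a ha b hb heq
    obtain ⟨i, hi, rfl⟩ := List.mem_iff_getElem.mp hrow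
    have := h i hi (PySem.List.pyGetD comp[i] a 0)
      (by
        rw [List.getD_eq_getElem _ _ (by simpa using hi), List.getElem_map]
        exact (PySem.Set.mem_ofList _ _).mpr (List.mem_map_of_mem ha))
    apply this
    rw [PySem.Set.contains, List.contains_iff_mem]
    rw [List.getD_eq_getElem _ _ (by simpa using hi), List.getElem_map]
    rw [heq]
    exact (PySem.Set.mem_ofList _ _).mpr (List.mem_map_of_mem hb)
  · intro h i hi v hv hcont
    rw [List.getD_eq_getElem _ _ (by simpa using hi), List.getElem_map] at hv
    rw [PySem.Set.contains, List.contains_iff_mem,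
      List.getD_eq_getElem _ _ (by simpa using hi), List.getElem_map] at hcont
    obtain ⟨a, ha, rfl⟩ := List.mem_map.mp ((PySem.Set.mem_ofList _ _).mp hv)
    obtain ⟨b, hb, hba⟩ := List.mem_map.mp ((PySem.Set.mem_ofList _ _).mp hcont)
    exact h comp[i] (List.getElem_mem hi) a ha b hb hba.symm

-- ---- B-side lemmas ----

theorem pvRowPass_length (n : Nat) (row : List Int) (r : List Bool) :
    (pvRowPass n row r).length = n := by
  simp [pvRowPass]

theorem pvMem_vals {α : Type} [BEq α] [LawfulBEq α] (l : List Nat) (c : Nat → Bool) (g : Nat → α)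
    (s : PySem.Set α) (v : α) :
    v ∈ l.foldl (fun s i => if c i then PySem.Set.add s (g i) else s) s
      ↔ v ∈ s ∨ ∃ i ∈ l, c i = true ∧ v = g i := by
  induction l generalizing s with
  | nil => simp
  | cons x xs ih =>
    rw [List.foldl_cons]
    by_cases hx : c x = true
    · rw [if_pos hx, ih]
      simp only [PySem.Set.mem_add, List.mem_cons]
      constructor
      · rintro ((h | rfl) | ⟨i, hi, hc, rfl⟩)
        · exact Or.inl h
        · exact Or.inr ⟨x, Or.inl rfl, hx, rfl⟩
        · exact Or.inr ⟨i, Or.inr hi, hc, rfl⟩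
      · rintro (h | ⟨i, (rfl | hi), hc, rfl⟩)
        · exact Or.inl (Or.inl h)
        · exact Or.inl (Or.inr rfl)
        · exact Or.inr ⟨i, hi, hc, rfl⟩
    · rw [if_neg hx, ih]
      simp only [List.mem_cons]
      constructor
      · rintro (h | ⟨i, hi, hc, rfl⟩)
        · exact Or.inl h
        · exact Or.inr ⟨i, Or.inr hi, hc, rfl⟩
      · rintro (h | ⟨i, (rfl | hi), hc, rfl⟩)
        · exact Or.inl h
        · exact absurd hc hx
        · exact Or.inr ⟨i, hi, hc, rfl⟩

theorem pvRowPass_getD (n : Nat) (row : List Int) (r : List Bool) (j : Nat) (hj : j < n) :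
    (pvRowPass n row r).getD j false
      = (r.getD j false ||
         decide (∃ i, i < n ∧ r.getD i false = true ∧ pvVal row i = pvVal row j)) := by
  unfold pvRowPass
  rw [PySem.List.getD_map_range _ _ _ _ hj]
  congr 1
  cases hmem : PySem.Set.contains ((List.range n).foldl
      (fun s i => if r.getD i false then PySem.Set.add s (PySem.List.pyGetD row (i : Int) 0) else s)
      PySem.Set.empty) (PySem.List.pyGetD row (j : Int) 0) with
  | true =>
    have hm := (PySem.Set.contains_iff _ _).mp hmem
    rw [pvMem_vals] at hm
    rcases hm with h | ⟨i, hi, hc, hv⟩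
    · cases h
    · symm
      simp only [decide_eq_true_eq]
      exact ⟨i, List.mem_range.mp hi, hc, by rw [pvVal, pvVal, ← hv]⟩
  | false =>
    symm
    simp only [decide_eq_false_iff_not]
    rintro ⟨i, hi, hri, hvi⟩
    have : PySem.List.pyGetD row (j : Int) 0 ∈ (List.range n).foldl
        (fun s i => if r.getD i false then PySem.Set.add s (PySem.List.pyGetD row (i : Int) 0) else s)
        PySem.Set.empty := by
      rw [pvMem_vals]
      exact Or.inr ⟨i, List.mem_range.mpr hi, hri, hvi.symm⟩
    rw [← PySem.Set.contains_iff] at this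
    rw [this] at hmem
    cases hmem

theorem pvGetD_true_lt (r : List Bool) (j : Nat) (h : r.getD j false = true) : j < r.length := by
  by_contra hge
  rw [List.getD_eq_default r false (by omega)] at h
  cases h

theorem pvRowPass_ext (n : Nat) (row : List Int) (r : List Bool) (hr : r.length = n) (j : Nat)
    (h : r.getD j false = true) : (pvRowPass n row r).getD j false = true := by
  have hj : j < n := hr ▸ pvGetD_true_lt r j h
  rw [pvRowPass_getD n row r j hj, h, Bool.true_or]

theorem pvFold_ext (n : Nat) (l : List (List Int)) (r : List Bool) (hr : r.length = n) (j : Nat)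
    (h : r.getD j false = true) :
    (l.foldl (fun r row => pvRowPass n row r) r).getD j false = true := by
  induction l generalizing r with
  | nil => exact h
  | cons row rest ih =>
    exact ih (pvRowPass n row r) (pvRowPass_length n row r) (pvRowPass_ext n row r hr j h)

theorem pvFold_length (n : Nat) (l : List (List Int)) (r : List Bool) (hr : r.length = n) :
    (l.foldl (fun r row => pvRowPass n row r) r).length = n := by
  induction l generalizing r with
  | nil => exact hr
  | cons row rest ih => exact ih (pvRowPass n row r) (pvRowPass_length n row r)

theorem pvIterN_length (comp : List (List Int)) (n k : Nat) : (pvIterN comp n k).length = n := by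
  induction k with
  | zero => simp [pvIterN]
  | succ k ih => exact pvFold_length n comp _ ih

theorem pvIterN_sound (comp : List (List Int)) (n k : Nat) (j : Nat)
    (h : (pvIterN comp n k).getD j false = true) : j < n ∧ pvReach comp n j := by
  induction k generalizing j with
  | zero =>
    have hj : j < n := by
      have := pvGetD_true_lt _ _ h
      rwa [pvIterN_length] at this
    rw [pvIterN] at h
    rw [PySem.List.getD_map_range _ _ _ _ hj, decide_eq_true_eq] at h
    subst h
    exact ⟨hj, Relation.ReflTransGen.refl⟩
  | succ k ih =>
    -- h : getD of pass of iter k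
    rw [pvIterN, pvPass] at h
    -- generic: fold preserves soundness
    suffices H : ∀ (l : List (List Int)) (r : List Bool), r.length = n →
        (∀ row ∈ l, row ∈ comp) →
        (∀ j', r.getD j' false = true → j' < n ∧ pvReach comp n j') →
        ∀ j', (l.foldl (fun r row => pvRowPass n row r) r).getD j' false = true →
          j' < n ∧ pvReach comp n j' by
      exact H comp (pvIterN comp n k) (pvIterN_length comp n k) (fun _ h => h) ih j h
    intro l
    induction l with
    | nil => intro r _ _ hgood j' hj'; exact hgood j' hj'
    | cons row rest ihl =>
      intro r hrlen hmem hgood j' hj'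
      refine ihl (pvRowPass n row r) (pvRowPass_length n row r)
        (fun x hx => hmem x (List.mem_cons_of_mem row hx)) ?_ j' hj'
      intro m hm
      have hmn : m < n := by
        have := pvGetD_true_lt _ _ hm
        rwa [pvRowPass_length] at this
      rw [pvRowPass_getD n row r m hmn] at hm
      rcases Bool.or_eq_true_iff.mp hm with hold | hnew
      · exact hgood m hold
      · obtain ⟨i, hi, hri, hv⟩ := decide_eq_true_eq.mp hnew
        obtain ⟨_, hreach⟩ := hgood i hri
        exact ⟨hmn, hreach.tail ⟨(hgood i hri).1, hmn,
          row, hmem row (List.mem_cons_self) , hv⟩⟩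

theorem pvCount_le (a : List Bool) : ∀ (b : List Bool), a.length = b.length →
    (∀ j, a.getD j false = true → b.getD j false = true) →
    a.count true ≤ b.count true := by
  induction a with
  | nil => intro b _ _; simp
  | cons x xs ih =>
    intro b hl h
    cases b with
    | nil => simp at hl
    | cons y ys =>
      have hx : x = true → y = true := h 0
      have htail := ih ys (by simpa using hl) (fun j => h (j + 1))
      simp only [List.count_cons]
      cases x with
      | true => rw [hx rfl]; simp; omega
      | false => simp; omega

theorem pvEq_of_count_le (a : List Bool) : ∀ (b : List Bool), a.length = b.length →
    (∀ j, a.getD j false = true → b.getD j false = true) →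
    b.count true ≤ a.count true → a = b := by
  induction a with
  | nil => intro b hl _ _; cases b with | nil => rfl | cons y ys => simp at hl
  | cons x xs ih =>
    intro b hl h hc
    cases b with
    | nil => simp at hl
    | cons y ys =>
      have hx : x = true → y = true := h 0
      have htail := fun j => h (j + 1)
      have hlen : xs.length = ys.length := by simpa using hl
      have hcnt := pvCount_le xs ys hlen htail
      simp only [List.count_cons] at hc
      have hxy : x = y := by
        cases x with
        | true => exact (hx rfl).symm
        | false =>
          cases y with
          | false => rfl
          | true => simp at hc; omega
      subst hxy
      have : ys.count true ≤ xs.count true := by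
        cases x <;> simp at hc <;> omega
      rw [ih ys hlen htail this]

theorem pvStall (comp : List (List Int)) (n : Nat) (hn : 1 ≤ n) :
    ∃ k, pvPass comp n (pvIterN comp n k) = pvIterN comp n k
      ∧ pvIterN comp n n = pvIterN comp n k := by
  -- pass is extensive on iterates
  have hext : ∀ k j, (pvIterN comp n k).getD j false = true →
      (pvIterN comp n (k+1)).getD j false = true := by
    intro k j h
    exact pvFold_ext n comp _ (pvIterN_length comp n k) j h
  -- if two consecutive iterates have equal counts they are equal
  have heqc : ∀ k, (pvIterN comp n (k+1)).count true ≤ (pvIterN comp n k).count true →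
      pvIterN comp n (k+1) = pvIterN comp n k := by
    intro k hc
    exact (pvEq_of_count_le (pvIterN comp n k) (pvIterN comp n (k+1))
      (by rw [pvIterN_length, pvIterN_length]) (hext k) hc).symm
  -- find a stall point below n
  by_cases hstall : ∃ k, k < n ∧ pvIterN comp n (k+1) = pvIterN comp n k
  · obtain ⟨k, hk, hfix⟩ := hstall
    have hconst : ∀ m, pvIterN comp n (k + m) = pvIterN comp n k := by
      intro m
      induction m with
      | zero => rfl
      | succ m ihm =>
        show pvIterN comp n (k + m + 1) = _
        rw [pvIterN, ihm, ← pvIterN]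
        exact hfix
    refine ⟨k, hfix, ?_⟩
    have := hconst (n - k)
    rwa [Nat.add_sub_cancel' (by omega)] at this
  · exfalso
    push Not at hstall
    -- counts strictly increase n times, but count ≤ length = n and count 0 ≥ 1
    have hstrict : ∀ k, k < n → (pvIterN comp n k).count true < (pvIterN comp n (k+1)).count true := by
      intro k hk
      by_contra hle
      exact hstall k hk (heqc k (by omega))
    have hgrow : ∀ k, k ≤ n → k + (pvIterN comp n 0).count true ≤ (pvIterN comp n k).count true := by
      intro k hk
      induction k with
      | zero => omega
      | succ k ihk =>
        have h1 := hstrict k (by omega)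
        have h2 := ihk (by omega)
        omega
    have h0 : 1 ≤ (pvIterN comp n 0).count true := by
      have : (pvIterN comp n 0).getD 0 false = true := by
        rw [pvIterN, PySem.List.getD_map_range _ _ _ _ (by omega)]
        simp
      have hmem : true ∈ pvIterN comp n 0 := by
        have hlt := pvGetD_true_lt _ _ this
        rw [List.getD_eq_getElem _ _ hlt] at this
        exact this ▸ List.getElem_mem hlt
      exact List.count_pos_iff.mpr hmem
    have hlen : (pvIterN comp n n).count true ≤ n := by
      have := List.count_le_length (l := pvIterN comp n n) (a := true)
      rwa [pvIterN_length] at this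
    have := hgrow n (le_refl n)
    omega

theorem pvClosed (comp : List (List Int)) (n : Nat) (R : List Bool) (hR : R.length = n)
    (hfix : pvPass comp n R = R) (i j : Nat) (hi : R.getD i false = true) (hj : j < n)
    (he : pvEdge comp i j) : R.getD j false = true := by
  obtain ⟨row, hrow, hv⟩ := he
  obtain ⟨l1, l2, rfl⟩ := List.append_of_mem hrow
  rw [← hfix, pvPass, List.foldl_append, List.foldl_cons]
  have hR1len : (l1.foldl (fun r row => pvRowPass n row r) R).length = n :=
    pvFold_length n l1 R hR
  have hR1 : (l1.foldl (fun r row => pvRowPass n row r) R).getD i false = true :=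
    pvFold_ext n l1 R hR i hi
  have hstep : (pvRowPass n row (l1.foldl (fun r row => pvRowPass n row r) R)).getD j false = true := by
    rw [pvRowPass_getD n row _ j hj]
    have hi_n : i < n := by
      have := pvGetD_true_lt _ _ hi; omega
    have : decide (∃ i', i' < n ∧ (l1.foldl (fun r row => pvRowPass n row r) R).getD i' false = true
        ∧ pvVal row i' = pvVal row j) = true := by
      rw [decide_eq_true_eq]
      exact ⟨i, hi_n, hR1, hv⟩
    rw [this, Bool.or_true]
  exact pvFold_ext n l2 _ (pvRowPass_length n row _) j hstep

theorem pvAlt_reach (comp : List (List Int)) (n : Nat) :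
    (List.range n).foldl (fun r _ => comp.foldl (fun r row => pvRowPass n row r) r)
        ((List.range n).map (fun i => decide (i = 0)))
      = pvIterN comp n n := by
  suffices H : ∀ k, (List.range k).foldl (fun r _ => comp.foldl (fun r row => pvRowPass n row r) r)
      ((List.range n).map (fun i => decide (i = 0))) = pvIterN comp n k from H n
  intro k
  induction k with
  | zero => rfl
  | succ k ih =>
    rw [List.range_succ, List.foldl_append, ih]
    rfl

-- ---- assembly ----

theorem pvIter_getD0 (comp : List (List Int)) (n k : Nat) (hn : 0 < n) :
    (pvIterN comp n k).getD 0 false = true := by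
  induction k with
  | zero =>
    rw [pvIterN, PySem.List.getD_map_range _ _ _ _ hn]
    simp
  | succ k ih => exact pvFold_ext n comp _ (pvIterN_length comp n k) 0 ih

theorem pvEdge_symm (comp : List (List Int)) (i j : Nat) (h : pvEdge comp i j) :
    pvEdge comp j i := by
  obtain ⟨row, hrow, hv⟩ := h
  exact ⟨row, hrow, hv.symm⟩

theorem pvAlt_eq (comp : List (List Int)) :
    breakable_n_alt comp
      = (decide (2 ≤ (comp.headD []).length)
          && ! ((pvIterN comp (comp.headD []).length (comp.headD []).length).all (fun b => b))) := by
  show (decide (2 <= (comp.headD []).length)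
      && ! (((List.range (comp.headD []).length).foldl
              (fun r _ => comp.foldl (fun r row => pvRowPass (comp.headD []).length row r) r)
              ((List.range (comp.headD []).length).map (fun i => decide (i = 0)))).all
            (fun b => b))) = _
  rw [pvAlt_reach]

theorem pvSplit_of_A (comp : List (List Int)) (h : breakable_n comp = true) :
    ∃ p, pvSplit comp (comp.headD []).length p := by
  unfold breakable_n at h
  rw [List.any_eq_true] at h
  obtain ⟨ind, hmem, hcheck⟩ := h
  rw [pvMem_partitions] at hmem
  obtain ⟨hsub, h1, h2⟩ := hmem
  rw [pvNoSharedAll_iff] at hcheck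
  refine ⟨fun i => decide ((i : Int) ∈ ind), ?_, ?_, ?_⟩
  · obtain ⟨a, ha⟩ := List.exists_mem_of_length_pos (by omega : 0 < ind.length)
    have has := hsub.subset ha
    rw [PySem.List.mem_pyRange_one] at has
    refine ⟨a.toNat, by omega, ?_⟩
    show decide (((a.toNat : Nat) : Int) ∈ ind) = true
    rw [Int.toNat_of_nonneg has.1]
    exact decide_eq_true ha
  · by_contra hno
    push Not at hno
    have hsubs : PySem.List.pyRange 0 (((comp.headD []).length : Nat) : Int) 1 ⊆ ind := by
      intro b hb
      rw [PySem.List.mem_pyRange_one] at hb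
      have hb2 : ¬ (decide (((b.toNat : Nat) : Int) ∈ ind) = false) := hno b.toNat (by omega)
      rw [Int.toNat_of_nonneg hb.1] at hb2
      simpa using hb2
    have hlen : (PySem.List.pyRange 0 (((comp.headD []).length : Nat) : Int) 1).length ≤ ind.length := by
      calc (PySem.List.pyRange 0 (((comp.headD []).length : Nat) : Int) 1).length
          = (PySem.List.pyRange 0 (((comp.headD []).length : Nat) : Int) 1).toFinset.card :=
            (List.toFinset_card_of_nodup (PySem.List.nodup_pyRange_one _ _)).symm
        _ ≤ ind.toFinset.card := Finset.card_le_card (by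
            intro x hx; rw [List.mem_toFinset] at *; exact hsubs hx)
        _ ≤ ind.length := ind.toFinset_card_le
    rw [PySem.List.length_pyRange_one] at hlen
    omega
  · intro i j hi hj hpi hpj hedge
    obtain ⟨row, hrow, hv⟩ := hedge
    have hbi : (i : Int) ∈ ind := of_decide_eq_true hpi
    have hbj : (j : Int) ∉ ind := by
      have hpj' : decide ((j : Int) ∈ ind) = false := hpj
      simpa using hpj'
    have hbj2 : (j : Int) ∈ pvInd2 (comp.headD []).length ind :=
      (pvMem_ind2 _ _ _).mpr ⟨⟨by omega, by exact_mod_cast hj⟩, hbj⟩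
    exact hcheck row hrow _ hbi _ hbj2 hv

theorem pvA_of_split (comp : List (List Int)) (p : Nat → Bool)
    (h : pvSplit comp (comp.headD []).length p) : breakable_n comp = true := by
  obtain ⟨⟨i0, hi0, hp0⟩, ⟨j0, hj0, hq0⟩, hcross⟩ := h
  unfold breakable_n
  rw [List.any_eq_true]
  refine ⟨((List.range (comp.headD []).length).filter (fun i => p i)).map (fun i : Nat => (i : Int)),
    ?_, ?_⟩
  · rw [pvMem_partitions]
    refine ⟨?_, ?_, ?_⟩
    · rw [PySem.List.pyRange_zero_nat]
      exact ((List.range (comp.headD []).length).filter_sublist).map _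
    · rw [List.length_map]
      have : i0 ∈ (List.range (comp.headD []).length).filter (fun i => p i) :=
        List.mem_filter.mpr ⟨List.mem_range.mpr hi0, hp0⟩
      have := List.length_pos_of_mem this
      omega
    · rw [List.length_map]
      have hle := List.length_filter_le (fun i => p i) (List.range (comp.headD []).length)
      rw [List.length_range] at hle
      rcases Nat.lt_or_ge ((List.range (comp.headD []).length).filter (fun i => p i)).length
          (comp.headD []).length with hlt | hge
      · omega
      · exfalso
        have heq : ((List.range (comp.headD []).length).filter (fun i => p i)).length
            = (List.range (comp.headD []).length).length := by
          rw [List.length_range]; omega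
        have := List.length_filter_eq_length_iff.mp heq j0 (List.mem_range.mpr hj0)
        rw [hq0] at this
        cases this
  · rw [pvNoSharedAll_iff]
    intro row hrow a ha b hb heq
    obtain ⟨i, hif, rfl⟩ := List.mem_map.mp ha
    obtain ⟨hirange, hpi⟩ := List.mem_filter.mp hif
    rw [List.mem_range] at hirange
    rw [pvMem_ind2] at hb
    obtain ⟨⟨hb0, hbn⟩, hbnotin⟩ := hb
    have hjn : b.toNat < (comp.headD []).length := by omega
    have hpj : p b.toNat = false := by
      cases hpb : p b.toNat with
      | false => rfl
      | true =>
        exfalso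
        apply hbnotin
        refine List.mem_map.mpr ⟨b.toNat, List.mem_filter.mpr ⟨List.mem_range.mpr hjn, hpb⟩, ?_⟩
        exact Int.toNat_of_nonneg hb0
    apply hcross i b.toNat hirange hjn hpi hpj
    refine ⟨row, hrow, ?_⟩
    unfold pvVal
    rw [Int.toNat_of_nonneg hb0]
    exact heq

theorem pvB_true_of_A (comp : List (List Int)) (h : breakable_n comp = true) :
    breakable_n_alt comp = true := by
  obtain ⟨p, hsplit⟩ := pvSplit_of_A comp h
  obtain ⟨⟨i0, hi0, hp0⟩, ⟨j0, hj0, hq0⟩, hcross⟩ := hsplit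
  have hne : i0 ≠ j0 := by intro hmm; rw [hmm, hq0] at hp0; cases hp0
  have hn2 : 2 ≤ (comp.headD []).length := by omega
  -- q : the side of column 0
  by_cases hp0side : p 0 = true
  case pos =>
    -- reachable ⊆ p-side; j0 is outside
    have hreach : ∀ j, pvReach comp (comp.headD []).length j → p j = true := by
      intro j hr
      induction hr with
      | refl => exact hp0side
      | tail _ hstep ih =>
        rename_i b c _
        obtain ⟨hbn, hcn, hedge⟩ := hstep
        cases hpc : p c with
        | true => rfl
        | false => exact absurd hedge (hcross b c hbn hcn ih hpc)
    rw [pvAlt_eq, decide_eq_true hn2, Bool.true_and, Bool.not_eq_true']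
    rw [← Bool.not_eq_true, List.all_eq_true]
    intro hall
    have hR : (pvIterN comp (comp.headD []).length (comp.headD []).length).getD j0 false = true := by
      have hjlen : j0 < (pvIterN comp (comp.headD []).length (comp.headD []).length).length := by
        rw [pvIterN_length]; exact hj0
      rw [List.getD_eq_getElem _ _ hjlen]
      exact hall _ (List.getElem_mem hjlen)
    have := (pvIterN_sound comp _ _ j0 hR).2
    rw [hreach j0 this] at hq0
    cases hq0
  case neg =>
    have hreach : ∀ j, pvReach comp (comp.headD []).length j →
        (j < (comp.headD []).length ∧ p j = false) := by
      intro j hr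
      induction hr with
      | refl => exact ⟨by omega, Bool.not_eq_true _ ▸ (by simpa using hp0side)⟩
      | tail _ hstep ih =>
        rename_i b c _
        obtain ⟨hbn, hcn, hedge⟩ := hstep
        refine ⟨hcn, ?_⟩
        cases hpc : p c with
        | false => rfl
        | true => exact absurd (pvEdge_symm comp b c hedge) (hcross c b hcn hbn hpc ih.2)
    rw [pvAlt_eq, decide_eq_true hn2, Bool.true_and, Bool.not_eq_true']
    rw [← Bool.not_eq_true, List.all_eq_true]
    intro hall
    have hR : (pvIterN comp (comp.headD []).length (comp.headD []).length).getD i0 false = true := by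
      have hjlen : i0 < (pvIterN comp (comp.headD []).length (comp.headD []).length).length := by
        rw [pvIterN_length]; exact hi0
      rw [List.getD_eq_getElem _ _ hjlen]
      exact hall _ (List.getElem_mem hjlen)
    have := (pvIterN_sound comp _ _ i0 hR).2
    rw [(hreach i0 this).2] at hp0
    cases hp0

theorem pvA_true_of_B (comp : List (List Int)) (h : breakable_n_alt comp = true) :
    breakable_n comp = true := by
  rw [pvAlt_eq] at h
  rcases Bool.and_eq_true_iff.mp h with ⟨hn2, hnall⟩
  have hn2' : 2 ≤ (comp.headD []).length := of_decide_eq_true hn2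
  rw [Bool.not_eq_true', ← Bool.not_eq_true, List.all_eq_true] at hnall
  push Not at hnall
  obtain ⟨x, hxmem, hxf⟩ := hnall
  obtain ⟨jw, hjwlen, rfl⟩ := List.mem_iff_getElem.mp hxmem
  have hjw : jw < (comp.headD []).length := by
    rwa [pvIterN_length] at hjwlen
  have hjwf : (pvIterN comp (comp.headD []).length (comp.headD []).length).getD jw false = false := by
    rw [List.getD_eq_getElem _ _ hjwlen]
    simpa using hxf
  obtain ⟨k, hfix, hiter⟩ := pvStall comp (comp.headD []).length (by omega)
  have hfixn : pvPass comp (comp.headD []).length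
      (pvIterN comp (comp.headD []).length (comp.headD []).length)
      = pvIterN comp (comp.headD []).length (comp.headD []).length := by
    rw [hiter]; exact hfix
  apply pvA_of_split comp
    (fun i => (pvIterN comp (comp.headD []).length (comp.headD []).length).getD i false)
  refine ⟨⟨0, by omega, pvIter_getD0 comp _ _ (by omega)⟩, ⟨jw, hjw, hjwf⟩, ?_⟩
  intro i j hi hj hpi hpj hedge
  have hcl := pvClosed comp (comp.headD []).length _ (pvIterN_length comp _ _) hfixn i j hpi hj hedge
  have hpj' : (pvIterN comp (comp.headD []).length (comp.headD []).length).getD j false = false := hpj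
  rw [hcl] at hpj'
  cases hpj'

-- ===== VERDICT (by name: the statement is the Claim_ definition above) =====
theorem breakable_n_spec : Claim_equal_breakable_n := by
  intro comp _ _
  unfold Spec_breakable_n
  cases hA : breakable_n comp with
  | true => exact (pvB_true_of_A comp hA).symm
  | false =>
    cases hB : breakable_n_alt comp with
    | true => rw [pvA_true_of_B comp hB] at hA; cases hA
    | false => rfl
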